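-- pv_equiv track=rewrite | github.com/acrinym/AMrepo | am_pc_extract_strict.py | scan_number_from_text
-- ===== SOURCE A (Python) =====
-- def scan_number_from_text(text: str) -> str:
--     # first contiguous digits
--     buf = []
--     for ch in text:
--         if ch.isdigit():
--             buf.append(ch)
--         elif buf:
--             break
--     return "".join(buf) if buf else ""
-- ===== SOURCE B (Python) =====
-- def scan_number_from_text(text: str) -> str:
--     # skip the leading non-digit prefix, then take the digit run
--     rest = text
--     while rest and not rest[0].isdigit():
--         rest = rest[1:]
--     out = ""
--     while rest and rest[0].isdigit():
--         out += rest[0]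
--         rest = rest[1:]
--     return out
-- ===== Notes on version B (the rewrite author's own statement) =====
-- stated objective: alternative
-- what changed: Replaces the single accumulate-with-break loop over a buffer by a skip-then-take decomposition: first drop the non-digit prefix, then collect the digit run (plainer shape; string slicing makes it slower in CPython).
import Mathlib
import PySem

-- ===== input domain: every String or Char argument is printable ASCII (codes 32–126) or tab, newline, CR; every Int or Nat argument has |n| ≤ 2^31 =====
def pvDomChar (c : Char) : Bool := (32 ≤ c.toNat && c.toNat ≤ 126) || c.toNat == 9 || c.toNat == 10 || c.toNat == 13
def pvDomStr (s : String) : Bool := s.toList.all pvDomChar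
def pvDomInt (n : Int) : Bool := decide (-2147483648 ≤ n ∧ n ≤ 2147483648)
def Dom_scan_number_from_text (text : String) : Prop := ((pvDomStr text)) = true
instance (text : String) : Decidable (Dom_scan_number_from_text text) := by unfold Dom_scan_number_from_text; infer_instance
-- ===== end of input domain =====

-- B replaces A's accumulate-with-break loop by a skip-then-take decomposition (two plain loops, no break).


-- ===== PORT A =====
-- A's single loop: append digits to buf; on a non-digit with buf non-empty, break.
def scanA (cs : List Char) (buf : List Char) : List Char :=
  match cs with
  | [] => buf
  | c :: rest =>
      if PySem.Chars.isdigit c then scanA rest (buf ++ [c])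
      else if buf ≠ [] then buf
      else scanA rest buf

def scan_number_from_text (text : String) : String :=
  String.mk (scanA text.toList [])

-- ===== PORT B =====
-- B's first while loop: drop characters while the head is a non-digit.
def dropNonDigit (cs : List Char) : List Char :=
  match cs with
  | [] => []
  | c :: rest => if ¬ PySem.Chars.isdigit c then dropNonDigit rest else c :: rest

-- B's second while loop: collect characters while the head is a digit.
def takeDigits (cs : List Char) : List Char :=
  match cs with
  | [] => []
  | c :: rest => if PySem.Chars.isdigit c then c :: takeDigits rest else []

def scan_number_from_text_alt (text : String) : String :=
  String.mk (takeDigits (dropNonDigit text.toList))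

-- ===== PRECONDITION & SPEC =====
def Spec_scan_number_from_text (text : String) (out : String) : Prop := out = scan_number_from_text_alt text
instance (text : String) (out : String) : Decidable (Spec_scan_number_from_text text out) := by unfold Spec_scan_number_from_text; infer_instance

-- ===== CLAIM (what is proved, stated in full; the proofs are below) =====
def Claim_equal_scan_number_from_text : Prop := ∀ (text : String), Dom_scan_number_from_text text → Spec_scan_number_from_text text (scan_number_from_text text)

-- ===== LEMMAS AND PROOFS =====

-- Once buf is non-empty, A's loop returns buf extended by the digit run at the front of cs.
theorem scanA_nonempty (cs : List Char) (buf : List Char) (h : buf ≠ []) :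
    scanA cs buf = buf ++ takeDigits cs := by
  induction cs generalizing buf with
  | nil => simp [scanA, takeDigits]
  | cons c rest ih =>
      by_cases hd : PySem.Chars.isdigit c
      · have : (buf ++ [c]) ≠ [] := by simp
        simp [scanA, takeDigits, hd, ih _ this]
      · simp [scanA, takeDigits, hd, h]

-- With an empty buffer, A's loop is B's skip-then-take.
theorem scanA_eq (cs : List Char) :
    scanA cs [] = takeDigits (dropNonDigit cs) := by
  induction cs with
  | nil => simp [scanA, dropNonDigit, takeDigits]
  | cons c rest ih =>
      by_cases hd : PySem.Chars.isdigit c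
      · have h1 : ([] : List Char) ++ [c] = [c] := rfl
        simp [scanA, dropNonDigit, takeDigits, hd,
          scanA_nonempty rest [c] (by simp)]
      · simp [scanA, dropNonDigit, hd, ih]

-- ===== VERDICT (by name: the statement is the Claim_ definition above) =====
theorem scan_number_from_text_spec : Claim_equal_scan_number_from_text := by
  intro text _
  unfold Spec_scan_number_from_text scan_number_from_text scan_number_from_text_alt
  rw [scanA_eq]
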